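-- pv_equiv track=rewrite | github.com/califano-lab/PanACEA | src/panacea_analysis.py | _fix_drug_col_underscores
-- ===== SOURCE A (Python) =====
-- from typing import Dict, List, Set, Tuple
--
-- def _fix_drug_col_underscores(cols: List[str]) -> List[str]:
--     """
--     Some drug names contain underscores; normalise so every column has exactly
--     3 tokens (drug_conc_time) by replacing extra underscores with hyphens.
--     """
--     fixed = []
--     for col in cols:
--         parts = col.split("_")
--         while len(parts) > 3:
--             col = col.replace("_", "-", 1)
--             parts = col.split("_")
--         fixed.append(col)
--     return fixed
-- ===== SOURCE B (Python) =====
-- from typing import List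
--
-- def _fix_drug_col_underscores(cols: List[str]) -> List[str]:
--     """
--     Single right-to-left pass per column: keep the last two underscores,
--     turn every earlier underscore into a hyphen.
--     """
--     def fix(col: str) -> str:
--         out = []
--         seen = 0
--         for c in reversed(col):
--             if c == '_':
--                 out.append('_' if seen < 2 else '-')
--                 seen += 1
--             else:
--                 out.append(c)
--         return ''.join(reversed(out))
--     return [fix(col) for col in cols]
-- ===== Notes on version B (the rewrite author's own statement) =====
-- stated objective: alternative
-- what changed: Replaces A's repeated replace-one-underscore-then-resplit while loop with a single right-to-left character scan per column that keeps a running count of underscores seen and hyphenates all but the last two.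
import Mathlib
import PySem

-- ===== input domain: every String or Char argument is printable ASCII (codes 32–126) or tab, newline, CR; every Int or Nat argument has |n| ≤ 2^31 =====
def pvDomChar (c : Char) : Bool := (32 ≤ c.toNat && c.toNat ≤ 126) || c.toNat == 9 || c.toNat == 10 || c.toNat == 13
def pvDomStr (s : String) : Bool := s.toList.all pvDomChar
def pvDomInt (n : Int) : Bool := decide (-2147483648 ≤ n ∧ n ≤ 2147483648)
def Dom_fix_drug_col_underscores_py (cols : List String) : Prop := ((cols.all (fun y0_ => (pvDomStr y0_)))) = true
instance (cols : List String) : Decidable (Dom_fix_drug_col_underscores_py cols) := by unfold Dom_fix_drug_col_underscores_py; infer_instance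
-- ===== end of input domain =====

-- B replaces A's repeated replace-first-underscore-and-resplit loop by one right-to-left
-- scan per column counting underscores seen (an alternative single-pass algorithm).


-- ===== PORT A =====
-- col.replace("_", "-", 1): replace the first occurrence of "_" by "-" (exact for a
-- one-character pattern with count 1; PySem has no counted replace, so ported by hand).
def replaceUnderscoreOnce : List Char → List Char
  | [] => []
  | c :: t => if c = '_' then '-' :: t else c :: replaceUnderscoreOnce t

-- termination lemmas for the while loop (cited by name in decreasing_by)
theorem splitOn_go_length (fuel : Nat) : ∀ (l cur : List Char) (acc : List (List Char)),
    l.length < fuel →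
    (PySem.Chars.splitOn.go ['_'] fuel l cur acc).length = acc.length + l.count '_' + 1 := by
  induction fuel with
  | zero => intro l cur acc h; omega
  | succ fuel ih =>
    intro l cur acc h
    cases l with
    | nil => simp [PySem.Chars.splitOn.go]
    | cons c rest =>
      by_cases hc : c = '_'
      · subst hc
        simp only [PySem.Chars.splitOn.go, List.isPrefixOf, BEq.rfl, Bool.true_and,
          if_true]
        rw [show List.drop ['_'].length ('_' :: rest) = rest from by simp]
        rw [ih rest [] (cur.reverse :: acc) (by simpa using Nat.lt_of_succ_lt_succ h)]
        simp
        omega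
      · simp only [PySem.Chars.splitOn.go, List.isPrefixOf, Bool.and_true]
        rw [if_neg (by simpa using Ne.symm hc)]
        rw [ih rest (c :: cur) acc (by simpa using Nat.lt_of_succ_lt_succ h)]
        simp [hc]

theorem splitOn_underscore_length (cs : List Char) :
    (PySem.Chars.splitOn cs ['_']).length = cs.count '_' + 1 := by
  unfold PySem.Chars.splitOn
  simpa using splitOn_go_length (cs.length + 1) cs [] [] (by omega)

theorem count_replaceUnderscoreOnce (cs : List Char) (h : 0 < cs.count '_') :
    (replaceUnderscoreOnce cs).count '_' = cs.count '_' - 1 := by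
  induction cs with
  | nil => simp at h
  | cons c t ih =>
    by_cases hc : c = '_'
    · subst hc; simp [replaceUnderscoreOnce]
    · have hmem : '_' ∈ t := by
        rcases List.mem_cons.mp (List.count_pos_iff.mp h) with h1 | h1
        · exact absurd h1.symm hc
        · exact h1
      rw [show replaceUnderscoreOnce (c :: t) = c :: replaceUnderscoreOnce t from by
            simp [replaceUnderscoreOnce, hc],
          List.count_cons, List.count_cons,
          ih (List.count_pos_iff.mpr hmem)]
      simp [hc]

-- while len(parts) > 3: col = col.replace("_", "-", 1); parts = col.split("_")
def fixLoopA (col : List Char) : List Char :=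
  if (PySem.Chars.splitOn col ['_']).length > 3 then
    fixLoopA (replaceUnderscoreOnce col)
  else col
termination_by col.count '_'
decreasing_by
  rename_i h
  rw [splitOn_underscore_length] at h
  have h0 : 0 < col.count '_' := by omega
  rw [count_replaceUnderscoreOnce col h0]
  omega

def fix_drug_col_underscores_py (cols : List String) : List String :=
  cols.foldl (fun fixed col => fixed ++ [String.ofList (fixLoopA col.toList)]) []

-- ===== PORT B =====
-- one step of B's reversed scan: state = (chars emitted so far, underscores seen)
def altStep (st : List Char × Nat) (c : Char) : List Char × Nat :=
  if c = '_' then ((if st.2 < 2 then '_' else '-') :: st.1, st.2 + 1)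
  else (c :: st.1, st.2)

-- scan reversed(col); consing to the front builds the final string directly
-- (Source B appends and reverses at the end, which yields the same list)
def fixColAlt (cs : List Char) : List Char :=
  (cs.reverse.foldl altStep ([], 0)).1

def fix_drug_col_underscores_py_alt (cols : List String) : List String :=
  cols.map (fun col => String.ofList (fixColAlt col.toList))

-- ===== PRECONDITION & SPEC =====
def Spec_fix_drug_col_underscores_py (cols : List String) (out : List String) : Prop := out = fix_drug_col_underscores_py_alt cols
instance (cols : List String) (out : List String) : Decidable (Spec_fix_drug_col_underscores_py cols out) := by unfold Spec_fix_drug_col_underscores_py; infer_instance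

-- ===== CLAIM (what is proved, stated in full; the proofs are below) =====
def Claim_equal_fix_drug_col_underscores_py : Prop := ∀ (cols : List String), Dom_fix_drug_col_underscores_py cols → Spec_fix_drug_col_underscores_py cols (fix_drug_col_underscores_py cols)

-- ===== LEMMAS AND PROOFS =====

-- the scan's counter counts the underscores processed
theorem foldl_altStep_snd (rs : List Char) :
    ∀ (o : List Char) (k : Nat), (rs.foldl altStep (o, k)).2 = k + rs.count '_' := by
  induction rs with
  | nil => simp
  | cons c t ih =>
    intro o k
    by_cases hc : c = '_'
    · subst hc
      by_cases hk : k < 2 <;> simp [altStep, hk, ih] <;> omega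
    · simp [altStep, hc, ih]

-- a block with no underscores passes through the scan untouched
theorem foldl_altStep_no_underscore (a : List Char) :
    ∀ (o : List Char) (k : Nat), '_' ∉ a → a.foldl altStep (o, k) = (a.reverse ++ o, k) := by
  induction a with
  | nil => simp
  | cons c t ih =>
    intro o k h
    have hc : c ≠ '_' := fun hc => h (hc ▸ List.mem_cons_self)
    simp only [List.foldl_cons, altStep, if_neg hc]
    rw [ih (c :: o) k (fun hm => h (List.mem_cons_of_mem _ hm))]
    simp

-- while at most two underscores remain to be counted, the scan copies its input
theorem foldl_altStep_small (rs : List Char) :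
    ∀ (o : List Char) (k : Nat), k + rs.count '_' ≤ 2 →
    (rs.foldl altStep (o, k)).1 = rs.reverse ++ o := by
  induction rs with
  | nil => simp
  | cons c t ih =>
    intro o k h
    by_cases hc : c = '_'
    · subst hc
      simp only [List.count_cons, BEq.rfl, if_true] at h
      have hk : k < 2 := by omega
      rw [List.foldl_cons, show altStep (o, k) '_' = ('_' :: o, k + 1) from by
        simp [altStep, hk]]
      rw [ih ('_' :: o) (k + 1) (by omega)]
      simp
    · simp only [List.count_cons, beq_iff_eq, hc, if_false, Nat.add_zero] at h
      simp only [List.foldl_cons, altStep, if_neg hc]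
      rw [ih (c :: o) k h]
      simp

theorem fixColAlt_id (cs : List Char) (h : cs.count '_' ≤ 2) : fixColAlt cs = cs := by
  unfold fixColAlt
  rw [foldl_altStep_small cs.reverse [] 0 (by simpa [List.count_reverse] using h)]
  simp

theorem exists_first_underscore (cs : List Char) (h : '_' ∈ cs) :
    ∃ a b, cs = a ++ '_' :: b ∧ '_' ∉ a := by
  induction cs with
  | nil => simp at h
  | cons c t ih =>
    by_cases hc : c = '_'
    · exact ⟨[], t, by simp [hc], by simp⟩
    · have ht : '_' ∈ t := by
        rcases List.mem_cons.mp h with h1 | h1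
        · exact absurd h1.symm hc
        · exact h1
      obtain ⟨a, b, hab, hna⟩ := ih ht
      refine ⟨c :: a, b, by simp [hab], ?_⟩
      simp only [List.mem_cons, not_or]
      exact ⟨Ne.symm hc, hna⟩

theorem replaceUnderscoreOnce_decomp (a b : List Char) (h : '_' ∉ a) :
    replaceUnderscoreOnce (a ++ '_' :: b) = a ++ '-' :: b := by
  induction a with
  | nil => simp [replaceUnderscoreOnce]
  | cons c t ih =>
    have hc : c ≠ '_' := fun hc => h (hc ▸ List.mem_cons_self)
    simp only [List.cons_append, replaceUnderscoreOnce, if_neg hc]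
    rw [ih (fun hm => h (List.mem_cons_of_mem _ hm))]

-- one replace-first-underscore step of A does not change B's result
-- while more than two underscores are present
theorem fixColAlt_step (cs : List Char) (h : 2 < cs.count '_') :
    fixColAlt (replaceUnderscoreOnce cs) = fixColAlt cs := by
  have hmem : '_' ∈ cs := List.count_pos_iff.mp (by omega)
  obtain ⟨a, b, hab, hna⟩ := exists_first_underscore cs hmem
  subst hab
  rw [replaceUnderscoreOnce_decomp a b hna]
  have hca : a.count '_' = 0 := List.count_eq_zero.mpr hna
  have hb : 2 ≤ b.count '_' := by
    simp [List.count_append, hca] at h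
    omega
  unfold fixColAlt
  rw [show (a ++ '-' :: b).reverse = (b.reverse ++ ['-']) ++ a.reverse from by simp,
      show (a ++ '_' :: b).reverse = (b.reverse ++ ['_']) ++ a.reverse from by simp]
  rw [List.foldl_append, List.foldl_append, List.foldl_append, List.foldl_append]
  set st := b.reverse.foldl altStep ([], 0) with hst
  have h2 : st.2 = b.count '_' := by
    rw [hst, foldl_altStep_snd]
    simp [List.count_reverse]
  have hnu : '_' ∉ a.reverse := by simpa using hna
  have e1 : List.foldl altStep st ['-'] = ('-' :: st.1, st.2) := by
    simp [altStep]
  have e2 : List.foldl altStep st ['_'] = ('-' :: st.1, st.2 + 1) := by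
    have hk : ¬ st.2 < 2 := by omega
    simp [altStep, hk]
  rw [e1, e2]
  rw [foldl_altStep_no_underscore _ _ _ hnu, foldl_altStep_no_underscore _ _ _ hnu]

-- per-column equivalence of the two algorithms
theorem fixLoop_eq_fixColAlt (cs : List Char) : fixLoopA cs = fixColAlt cs := by
  induction cs using fixLoopA.induct with
  | case1 col h ih =>
    rw [fixLoopA, if_pos h, ih, fixColAlt_step]
    rw [splitOn_underscore_length] at h
    omega
  | case2 col h =>
    rw [fixLoopA, if_neg h]
    rw [splitOn_underscore_length] at h
    exact (fixColAlt_id col (by omega)).symm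

-- ===== VERDICT (by name: the statement is the Claim_ definition above) =====
theorem fix_drug_col_underscores_py_spec : Claim_equal_fix_drug_col_underscores_py := by
  intro cols _
  show fix_drug_col_underscores_py cols = fix_drug_col_underscores_py_alt cols
  unfold fix_drug_col_underscores_py fix_drug_col_underscores_py_alt
  rw [PySem.List.foldl_append_singleton_eq_map]
  exact List.map_congr_left (fun s _ => by rw [fixLoop_eq_fixColAlt])
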